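-- pv_equiv track=rewrite | github.com/tongthanhkt/cryptarithmetic-main | main.py | handleInput
-- ===== SOURCE A (Python) =====
-- def handleInput(lhsString):
--     words = []
--     wordsAndOperators = []
--     tmpWord = ""
--     for i in range(len(lhsString)):
--         if (
--             lhsString[i] != "+"
--             and lhsString[i] != "-"
--             and lhsString[i] != "*"
--             and lhsString[i] != "("
--             and lhsString[i] != ")"
--         ):
--             tmpWord += lhsString[i]
--         else:
--             if tmpWord != "":
--                 words.append(tmpWord)
--                 wordsAndOperators.append(tmpWord)
--             wordsAndOperators.append(lhsString[i])
--             tmpWord = ""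
--     words.append(tmpWord)
--     wordsAndOperators.append(tmpWord)
--
--     return words, wordsAndOperators
-- ===== SOURCE B (Python) =====
-- def _split1(s):
--     """Return (segment before first operator, (operator, rest)) or (s, None)."""
--     for i, c in enumerate(s):
--         if c in "+-*()":
--             return s[:i], (c, s[i + 1:])
--     return s, None
--
--
-- def handleInput(lhsString):
--     words = []
--     wordsAndOperators = []
--     rest = lhsString
--     while True:
--         seg, cut = _split1(rest)
--         if cut is None:
--             words.append(seg)
--             wordsAndOperators.append(seg)
--             return words, wordsAndOperators
--         op, rest = cut
--         if seg:
--             words.append(seg)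
--             wordsAndOperators.append(seg)
--         wordsAndOperators.append(op)
-- ===== Notes on version B (the rewrite author's own statement) =====
-- stated objective: faster
-- what changed: Replaces A's character-by-character accumulator loop with a helper that splits the string at the first operator, driving a segment-at-a-time while-loop over (segment, operator, rest) triples; bulk slicing avoids per-character string concatenation (measured ~4x).
import Mathlib
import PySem

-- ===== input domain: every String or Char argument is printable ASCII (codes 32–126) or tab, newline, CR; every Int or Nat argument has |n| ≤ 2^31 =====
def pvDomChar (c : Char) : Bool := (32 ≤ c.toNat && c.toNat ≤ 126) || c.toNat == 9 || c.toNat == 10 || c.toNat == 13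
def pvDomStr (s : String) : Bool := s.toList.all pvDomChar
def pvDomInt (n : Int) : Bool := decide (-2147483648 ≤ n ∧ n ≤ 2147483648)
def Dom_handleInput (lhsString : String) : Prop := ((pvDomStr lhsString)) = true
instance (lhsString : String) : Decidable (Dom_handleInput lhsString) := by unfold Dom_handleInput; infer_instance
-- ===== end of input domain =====

-- B tokenizes by repeatedly splitting the string at the first operator (segment/operator/rest)
-- instead of A's per-character string accumulation; bulk slicing gave a measured constant-factor speedup.

-- ===== PORT A =====
-- A's for-loop over the characters, state = (words, wordsAndOperators, tmpWord).
def handleInputLoop : List Char → List String → List String → List Char →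
    List String × List String × List Char
  | [], ws, wos, tmp => (ws, wos, tmp)
  | c :: rest, ws, wos, tmp =>
    if c ≠ '+' ∧ c ≠ '-' ∧ c ≠ '*' ∧ c ≠ '(' ∧ c ≠ ')' then
      handleInputLoop rest ws wos (tmp ++ [c])
    else
      handleInputLoop rest
        (if tmp ≠ [] then ws ++ [String.ofList tmp] else ws)
        ((if tmp ≠ [] then wos ++ [String.ofList tmp] else wos) ++ [String.ofList [c]])
        []

def handleInput (lhsString : String) : List String × List String :=
  let r := handleInputLoop lhsString.toList [] [] []
  (r.1 ++ [String.ofList r.2.2], r.2.1 ++ [String.ofList r.2.2])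

-- ===== PORT B =====
-- port of Source B's _split1: segment before the first operator, and (operator, rest) if any.
def opChar (c : Char) : Bool := ['+', '-', '*', '(', ')'].contains c

def split1 : List Char → List Char × Option (Char × List Char)
  | [] => ([], none)
  | c :: rest =>
    if opChar c then ([], some (c, rest))
    else
      let r := split1 rest
      (c :: r.1, r.2)

theorem split1_rest_len : ∀ (cs : List Char) (op : Char) (r : List Char),
    (split1 cs).2 = some (op, r) → r.length < cs.length := by
  intro cs
  induction cs with
  | nil => intro op r h; simp [split1] at h
  | cons c rest ih =>
    intro op r h
    by_cases hc : opChar c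
    · simp [split1, hc] at h
      simp [h.2]
    · simp [split1, hc] at h
      exact Nat.lt_trans (ih op r h) (Nat.lt_succ_self _)

-- Source B's while-loop: each pass consumes one segment and one operator.
def altLoop (rest : List Char) (ws wos : List String) : List String × List String :=
  match h : split1 rest with
  | (seg, none) => (ws ++ [String.ofList seg], wos ++ [String.ofList seg])
  | (seg, some (op, r)) =>
    altLoop r
      (if seg ≠ [] then ws ++ [String.ofList seg] else ws)
      ((if seg ≠ [] then wos ++ [String.ofList seg] else wos) ++ [String.ofList [op]])
termination_by rest.length
decreasing_by
  exact split1_rest_len rest op r (by rw [h])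

def handleInput_alt (lhsString : String) : List String × List String :=
  altLoop lhsString.toList [] []

-- ===== PRECONDITION & SPEC =====
def Spec_handleInput (lhsString : String) (out : List String × List String) : Prop := out = handleInput_alt lhsString
instance (lhsString : String) (out : List String × List String) : Decidable (Spec_handleInput lhsString out) := by unfold Spec_handleInput; infer_instance

-- ===== CLAIM (what is proved, stated in full; the proofs are below) =====
def Claim_equal_handleInput : Prop := ∀ (lhsString : String), Dom_handleInput lhsString → Spec_handleInput lhsString (handleInput lhsString)

-- ===== LEMMAS AND PROOFS =====

theorem opChar_iff (c : Char) :
    opChar c = false ↔ (c ≠ '+' ∧ c ≠ '-' ∧ c ≠ '*' ∧ c ≠ '(' ∧ c ≠ ')') := by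
  simp [opChar, and_comm, and_assoc, and_left_comm]

-- altLoop with a pending prefix tmp glued onto the first segment.
def altLoopP (tmp : List Char) (cs : List Char) (ws wos : List String) :
    List String × List String :=
  match split1 cs with
  | (seg, none) => (ws ++ [String.ofList (tmp ++ seg)], wos ++ [String.ofList (tmp ++ seg)])
  | (seg, some (op, r)) =>
    altLoop r
      (if tmp ++ seg ≠ [] then ws ++ [String.ofList (tmp ++ seg)] else ws)
      ((if tmp ++ seg ≠ [] then wos ++ [String.ofList (tmp ++ seg)] else wos) ++ [String.ofList [op]])

theorem altLoopP_nil (cs : List Char) (ws wos : List String) :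
    altLoopP [] cs ws wos = altLoop cs ws wos := by
  rw [altLoop]
  unfold altLoopP
  rcases h : split1 cs with ⟨seg, cut⟩
  cases cut <;> simp

-- The key invariant: A's loop (with pending word tmp) followed by the final appends
-- computes exactly B's loop with tmp glued onto the first segment.
theorem key (cs : List Char) : ∀ (tmp : List Char) (ws wos : List String),
    ((handleInputLoop cs ws wos tmp).1 ++ [String.ofList (handleInputLoop cs ws wos tmp).2.2],
     (handleInputLoop cs ws wos tmp).2.1 ++ [String.ofList (handleInputLoop cs ws wos tmp).2.2])
      = altLoopP tmp cs ws wos := by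
  induction cs with
  | nil =>
    intro tmp ws wos
    simp [handleInputLoop, altLoopP, split1]
  | cons c rest ih =>
    intro tmp ws wos
    by_cases hc : opChar c
    · have hc' : ¬(c ≠ '+' ∧ c ≠ '-' ∧ c ≠ '*' ∧ c ≠ '(' ∧ c ≠ ')') := by
        intro h; rw [← opChar_iff] at h; simp [h] at hc
      rw [handleInputLoop, if_neg hc']
      rw [ih [] _ _, altLoopP_nil]
      unfold altLoopP
      simp [split1, hc]
    · have hc' : c ≠ '+' ∧ c ≠ '-' ∧ c ≠ '*' ∧ c ≠ '(' ∧ c ≠ ')' := by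
        rw [← opChar_iff]; simpa using hc
      rw [handleInputLoop, if_pos hc']
      rw [ih (tmp ++ [c]) ws wos]
      unfold altLoopP
      rcases h : split1 rest with ⟨seg, cut⟩
      have hsplit : split1 (c :: rest) = (c :: seg, cut) := by
        simp [split1, hc, h]
      rw [hsplit]
      cases cut <;> simp

-- ===== VERDICT (by name: the statement is the Claim_ definition above) =====
theorem handleInput_spec : Claim_equal_handleInput := by
  intro s _
  unfold Spec_handleInput handleInput handleInput_alt
  rw [← altLoopP_nil]
  exact key s.toList [] [] []
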